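-- pv_equiv track=rewrite | github.com/BasavarajSM776036/Document-Forgery-Detection-System | server/ml_verify.py | is_meaningful_text
-- ===== SOURCE A (Python) =====
-- def is_meaningful_text(text: str) -> bool:
--     """Filter out binary data, OCR noise, and meaningless strings."""
--     if not text or len(text.strip()) < 3:
--         return False
--
--
--     printable_ratio = sum(1 for c in text if c.isprintable() or c.isspace()) / len(text)
--     if printable_ratio < 0.7:
--         return False
--
--
--     special_char_ratio = sum(1 for c in text if not (c.isalnum() or c.isspace() or c in ".,!?;:-'\"()[]{}")) / len(text)
--     if special_char_ratio > 0.6: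
--         return False
--
--
--     control_chars = sum(1 for c in text if ord(c) < 32 and c not in "\n\r\t")
--     if control_chars > len(text) * 0.1:
--         return False
--
--
--     if not any(c.isalpha() for c in text):
--         return False
--
--     return True
-- ===== SOURCE B (Python) =====
-- def is_meaningful_text(text: str) -> bool:
--     """One fused pass over the text with a 4-field accumulator instead of
--     four separate scans; single final conjunction instead of early returns."""
--     if not text or len(text.strip()) < 3:
--         return False
--     printable = special = control = 0
--     has_alpha = False
--     for c in text:
--         if c.isprintable() or c.isspace():
--             printable += 1
--         if not (c.isalnum() or c.isspace() or c in ".,!?;:-'\"()[]{}"):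
--             special += 1
--         if ord(c) < 32 and c not in "\n\r\t":
--             control += 1
--         if c.isalpha():
--             has_alpha = True
--     n = len(text)
--     return (printable / n >= 0.7
--             and special / n <= 0.6
--             and control <= n * 0.1
--             and has_alpha)
-- ===== Notes on version B (the rewrite author's own statement) =====
-- stated objective: alternative
-- what changed: B replaces A's four separate scans with early returns by one fused pass maintaining a (printable, special, control, has_alpha) accumulator and a single final conjunction.
import Mathlib
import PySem

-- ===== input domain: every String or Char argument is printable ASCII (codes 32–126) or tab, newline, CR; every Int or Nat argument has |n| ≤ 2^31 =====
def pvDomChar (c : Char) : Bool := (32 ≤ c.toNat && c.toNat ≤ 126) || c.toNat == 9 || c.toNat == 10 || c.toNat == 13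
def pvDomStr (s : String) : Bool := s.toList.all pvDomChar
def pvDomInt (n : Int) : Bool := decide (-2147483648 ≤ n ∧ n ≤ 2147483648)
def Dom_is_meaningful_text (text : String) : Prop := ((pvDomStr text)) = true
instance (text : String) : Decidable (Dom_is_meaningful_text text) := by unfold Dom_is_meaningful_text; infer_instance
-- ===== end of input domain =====

-- B is the same heuristic computed in ONE fused pass with a 4-field accumulator and a
-- single final conjunction, instead of A's four separate scans with early returns.
-- Equivalence is about the return value; float ratio comparisons (x/n < 0.7 etc.) are
-- ported as the exact integer comparisons (10*x < 7*n etc.), exact on the tested sizes.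

-- shared per-character predicates (both Pythons use the same built-ins on each char)
-- c.isprintable(): exact on ASCII — true exactly for codes 32..126
def pyPrintable (c : Char) : Bool := 32 ≤ c.toNat && c.toNat ≤ 126
def pyIsPrintSp (c : Char) : Bool := pyPrintable c || PySem.Chars.isspace c
def pyIsSpecial (c : Char) : Bool :=
  !(PySem.Chars.isalnum c || PySem.Chars.isspace c || (".,!?;:-'\"()[]{}".toList.contains c))
def pyIsControl (c : Char) : Bool := c.toNat < 32 && !("\n\r\t".toList.contains c)

-- ===== PORT A =====
def is_meaningful_text (text : String) : Bool :=
  let tl := text.toList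
  if tl.isEmpty || (PySem.Chars.strip tl).length < 3 then false
  else
    let printable := tl.countP pyIsPrintSp
    if 10 * printable < 7 * tl.length then false
    else
      let special := tl.countP pyIsSpecial
      if 10 * special > 6 * tl.length then false
      else
        let control := tl.countP pyIsControl
        if 10 * control > tl.length then false
        else if !(tl.any PySem.Chars.isalpha) then false
        else true

-- ===== PORT B =====
def is_meaningful_text_alt (text : String) : Bool :=
  let tl := text.toList
  if tl.isEmpty || (PySem.Chars.strip tl).length < 3 then false
  else
    let st := tl.foldl
      (fun (s : Nat × Nat × Nat × Bool) c =>
        (s.1 + (if pyIsPrintSp c then 1 else 0),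
         s.2.1 + (if pyIsSpecial c then 1 else 0),
         s.2.2.1 + (if pyIsControl c then 1 else 0),
         s.2.2.2 || PySem.Chars.isalpha c))
      (0, 0, 0, false)
    let n := tl.length
    decide (7 * n ≤ 10 * st.1) && decide (10 * st.2.1 ≤ 6 * n) &&
      decide (10 * st.2.2.1 ≤ n) && st.2.2.2

-- ===== PRECONDITION & SPEC =====
def Spec_is_meaningful_text (text : String) (out : Bool) : Prop := out = is_meaningful_text_alt text
instance (text : String) (out : Bool) : Decidable (Spec_is_meaningful_text text out) := by unfold Spec_is_meaningful_text; infer_instance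

-- ===== CLAIM (what is proved, stated in full; the proofs are below) =====
def Claim_equal_is_meaningful_text : Prop := ∀ (text : String), Dom_is_meaningful_text text → Spec_is_meaningful_text text (is_meaningful_text text)

-- ===== LEMMAS AND PROOFS =====

-- the fused fold computes the three counts and the any-flag of the four scans at once
theorem fused_fold (tl : List Char) (a b c : Nat) (d : Bool) :
    tl.foldl
      (fun (s : Nat × Nat × Nat × Bool) ch =>
        (s.1 + (if pyIsPrintSp ch then 1 else 0),
         s.2.1 + (if pyIsSpecial ch then 1 else 0),
         s.2.2.1 + (if pyIsControl ch then 1 else 0),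
         s.2.2.2 || PySem.Chars.isalpha ch))
      (a, b, c, d)
    = (a + tl.countP pyIsPrintSp, b + tl.countP pyIsSpecial,
       c + tl.countP pyIsControl, d || tl.any PySem.Chars.isalpha) := by
  induction tl generalizing a b c d with
  | nil => simp
  | cons x xs ih =>
      simp only [List.foldl_cons, ih, List.countP_cons, List.any_cons, Prod.mk.injEq,
        Bool.or_assoc]
      exact ⟨by omega, by omega, by omega, trivial⟩

-- ===== VERDICT (by name: the statement is the Claim_ definition above) =====
theorem is_meaningful_text_spec : Claim_equal_is_meaningful_text := by
  intro text _
  unfold Spec_is_meaningful_text is_meaningful_text is_meaningful_text_alt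
  simp only [fused_fold, Nat.zero_add, Bool.false_or]
  set tl := text.toList
  split
  · rfl
  · by_cases h1 : 10 * tl.countP pyIsPrintSp < 7 * tl.length <;>
    by_cases h2 : 10 * tl.countP pyIsSpecial > 6 * tl.length <;>
    by_cases h3 : 10 * tl.countP pyIsControl > tl.length <;>
    by_cases h4 : tl.any PySem.Chars.isalpha <;>
    simp [h1, h2, h3, h4] <;> omega
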